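-- pv_equiv track=rewrite | github.com/pgarrett-scripps/FastaSuite | utils.py | map_locus_to_sequence_from_fasta
-- ===== SOURCE A (Python) =====
-- def map_locus_to_sequence_from_fasta(fasta_lines):
--     locus_to_sequence_map = {}
--     locus = None
--     for line in fasta_lines:
--         if line == "":
--             continue
--         elif line[0] == ">":  # new protein
--             locus = line.rstrip().split(" ")[0].replace(">", "")
--             description = " ".join(line.rstrip().split(" ")[1:])
--             locus_to_sequence_map[locus] = {'sequence': "", 'description': description}
--         else:  # protein sequence
--             locus_to_sequence_map[locus]['sequence'] += line.rstrip()
--     return locus_to_sequence_map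
-- ===== SOURCE B (Python) =====
-- def map_locus_to_sequence_from_fasta(fasta_lines):
--     # Two-phase: group lines into (header, body-lines) records, then build each
--     # entry at once with a single join instead of repeated string concatenation.
--     records = []
--     for line in fasta_lines:
--         if line == "":
--             continue
--         if line[0] == ">":
--             records.append((line, []))
--         else:
--             records[-1][1].append(line)  # IndexError if a body line precedes any header
--     result = {}
--     for header, body in records:
--         parts = header.rstrip().split(" ")
--         result[parts[0].replace(">", "")] = {
--             'sequence': "".join(l.rstrip() for l in body),
--             'description': " ".join(parts[1:]),
--         }
--     return result
-- ===== Notes on version B (the rewrite author's own statement) =====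
-- stated objective: alternative
-- what changed: B first groups the lines into (header, body-lines) records and then builds the map in a second pass, constructing each entry at once with a single ''.join instead of A's interleaved dict mutation and repeated string concatenation.
import Mathlib
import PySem

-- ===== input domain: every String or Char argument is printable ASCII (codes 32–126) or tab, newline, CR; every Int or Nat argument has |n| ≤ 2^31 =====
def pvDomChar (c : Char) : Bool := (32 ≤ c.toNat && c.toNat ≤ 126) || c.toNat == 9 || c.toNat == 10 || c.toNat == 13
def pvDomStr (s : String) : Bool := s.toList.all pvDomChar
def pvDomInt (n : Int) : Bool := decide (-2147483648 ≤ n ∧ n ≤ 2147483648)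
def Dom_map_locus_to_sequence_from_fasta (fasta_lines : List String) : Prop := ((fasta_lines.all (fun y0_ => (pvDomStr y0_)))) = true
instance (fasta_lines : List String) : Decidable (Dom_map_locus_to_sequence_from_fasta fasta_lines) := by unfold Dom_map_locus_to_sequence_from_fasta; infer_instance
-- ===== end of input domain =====

-- B groups the lines into (header, body) records first and then builds each map entry at
-- once with a single join, instead of A's interleaved dict mutation and string appending
-- (objective: alternative decomposition; return value only, neither mutates its argument).

-- ===== PORT A =====
-- A's loop body, step for step: skip "", header line → fresh entry + set locus,
-- otherwise append the rstripped line to the current locus's sequence.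
def stepA (st : PySem.Dict String (PySem.Dict String String) × Option String)
    (line : String) : PySem.Dict String (PySem.Dict String String) × Option String :=
  if line = "" then st
  else if PySem.Str.pyGet? line 0 = some '>' then
    let parts := (PySem.Str.split? (PySem.Str.rstrip line) " ").getD []
    let locus := PySem.Str.replace (parts.headD "") ">" ""
    let description := PySem.Str.join " " (PySem.List.slice parts (some 1) none)
    (st.1.insert locus (((PySem.Dict.empty).insert "sequence" "").insert "description" description),
     some locus)
  else
    match st.2 with
    | none => st  -- Python raises KeyError here (locus is None); excluded by Pre_
    | some l =>
      (st.1.modify l PySem.Dict.empty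
        (fun inner => inner.modify "sequence" "" (· ++ PySem.Str.rstrip line)), some l)

def map_locus_to_sequence_from_fasta (fasta_lines : List String) : List (String × List (String × String)) :=
  ((fasta_lines.foldl stepA (PySem.Dict.empty, none)).1.items).map (fun p => (p.1, p.2.items))

-- ===== PORT B =====
-- Source B phase 1: group into records; cur is the (mutable) last record records[-1].
def pvCollect : List String → Option (String × List String) → List (String × List String) → List (String × List String)
  | [], none, acc => acc
  | [], some r, acc => acc ++ [r]
  | l :: ls, cur, acc =>
    if l = "" then pvCollect ls cur acc
    else if PySem.Str.pyGet? l 0 = some '>' then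
      match cur with
      | none => pvCollect ls (some (l, [])) acc
      | some r => pvCollect ls (some (l, [])) (acc ++ [r])
    else
      match cur with
      | none => pvCollect ls none acc  -- Python raises IndexError (records[-1]); excluded by Pre_
      | some r => pvCollect ls (some (r.1, r.2 ++ [l])) acc

def pvLocus (header : String) : String :=
  PySem.Str.replace ((((PySem.Str.split? (PySem.Str.rstrip header) " ").getD []).headD "")) ">" ""

def pvEntry (header : String) (body : List String) : PySem.Dict String String :=
  let parts := (PySem.Str.split? (PySem.Str.rstrip header) " ").getD []
  ((PySem.Dict.empty).insert "sequence" (PySem.Str.join "" (body.map PySem.Str.rstrip))).insert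
    "description" (PySem.Str.join " " (PySem.List.slice parts (some 1) none))

-- Source B phase 2: one dict assignment per record.
def pvBuild (d : PySem.Dict String (PySem.Dict String String)) (rs : List (String × List String)) :
    PySem.Dict String (PySem.Dict String String) :=
  rs.foldl (fun d r => d.insert (pvLocus r.1) (pvEntry r.1 r.2)) d

def map_locus_to_sequence_from_fasta_alt (fasta_lines : List String) : List (String × List (String × String)) :=
  ((pvBuild PySem.Dict.empty (pvCollect fasta_lines none [])).items).map (fun p => (p.1, p.2.items))

-- ===== PRECONDITION & SPEC =====
def pvIsHeader (l : String) : Bool := decide (l ≠ "") && (PySem.Str.pyGet? l 0 == some '>')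

-- Pre_ excludes exactly the inputs where a non-empty sequence line precedes every header
-- line: there Python A raises KeyError (locus is still None), and Python B raises IndexError.
def Pre_map_locus_to_sequence_from_fasta (fasta_lines : List String) : Prop :=
  ((fasta_lines.takeWhile (fun l => !pvIsHeader l)).all (fun l => l == "")) = true
instance (fasta_lines : List String) : Decidable (Pre_map_locus_to_sequence_from_fasta fasta_lines) := by unfold Pre_map_locus_to_sequence_from_fasta; infer_instance

def pvWitness_map_locus_to_sequence_from_fasta : List String :=
  ["", ">P1 tau protein", "ABC", "", "DE F", ">P2", "GG", ">P1 again", "HH"]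

def Spec_map_locus_to_sequence_from_fasta (fasta_lines : List String) (out : List (String × List (String × String))) : Prop := out = map_locus_to_sequence_from_fasta_alt fasta_lines
instance (fasta_lines : List String) (out : List (String × List (String × String))) : Decidable (Spec_map_locus_to_sequence_from_fasta fasta_lines out) := by unfold Spec_map_locus_to_sequence_from_fasta; infer_instance

-- ===== CLAIM (what is proved, stated in full; the proofs are below) =====
def Claim_equal_map_locus_to_sequence_from_fasta : Prop := ∀ (fasta_lines : List String), Dom_map_locus_to_sequence_from_fasta fasta_lines → Pre_map_locus_to_sequence_from_fasta fasta_lines → Spec_map_locus_to_sequence_from_fasta fasta_lines (map_locus_to_sequence_from_fasta fasta_lines)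

-- ===== LEMMAS AND PROOFS =====

theorem pv_intercalate_nil_sep (xs : List (List Char)) :
    List.intercalate ([] : List Char) xs = xs.flatten := by
  induction xs with
  | nil => simp [List.intercalate]
  | cons a as ih =>
    cases as with
    | nil => simp [List.intercalate]
    | cons b bs =>
      simp only [List.intercalate] at *
      simp_all [List.intersperse]

theorem pv_join_snoc (xs : List String) (y : String) :
    PySem.Str.join "" (xs ++ [y]) = PySem.Str.join "" xs ++ y := by
  apply String.toList_inj.mp
  simp [PySem.Str.toList_join, PySem.Chars.join, pv_intercalate_nil_sep]

theorem pv_entry_modify (s t : String) (g : String → String) :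
    ((((PySem.Dict.empty).insert "sequence" s).insert "description" t) :
      PySem.Dict String String).modify "sequence" "" g
    = ((PySem.Dict.empty).insert "sequence" (g s)).insert "description" t := by
  simp [PySem.Dict.modify, PySem.Dict.insert, PySem.Dict.empty, PySem.Dict.getD, PySem.Dict.get?]

theorem pv_insert_modify (d : PySem.Dict String (PySem.Dict String String)) (k : String)
    (e : PySem.Dict String String) (f : PySem.Dict String String → PySem.Dict String String) :
    ((d.insert k e).modify k PySem.Dict.empty f) = d.insert k (f e) := by
  simp [PySem.Dict.modify, PySem.Dict.getD_insert_self, PySem.Dict.insert_insert_self]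

theorem pv_pvEntry_snoc (h l : String) (b : List String) :
    (pvEntry h b).modify "sequence" "" (· ++ PySem.Str.rstrip l) = pvEntry h (b ++ [l]) := by
  unfold pvEntry
  rw [pv_entry_modify]
  simp [pv_join_snoc]

theorem pv_build_snoc (d : PySem.Dict String (PySem.Dict String String))
    (rs : List (String × List String)) (r : String × List String) :
    pvBuild d (rs ++ [r]) = (pvBuild d rs).insert (pvLocus r.1) (pvEntry r.1 r.2) := by
  simp [pvBuild]

theorem pv_join_nil : PySem.Str.join "" [] = "" := rfl

-- main invariant once a header has been seen: A's dict is exactly the built dict of the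
-- completed records plus the current record so far, and both sides stay in lock-step
theorem pv_someCase (ls : List String) :
    ∀ (h : String) (b : List String) (acc : List (String × List String)),
    (ls.foldl stepA (pvBuild PySem.Dict.empty (acc ++ [(h, b)]), some (pvLocus h))).1
      = pvBuild PySem.Dict.empty (pvCollect ls (some (h, b)) acc) := by
  induction ls with
  | nil => intro h b acc; simp [pvCollect]
  | cons l ls ih =>
    intro h b acc
    by_cases hl : l = ""
    · have hst : stepA (pvBuild PySem.Dict.empty (acc ++ [(h, b)]), some (pvLocus h)) l
          = (pvBuild PySem.Dict.empty (acc ++ [(h, b)]), some (pvLocus h)) := by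
        simp [stepA, hl]
      have hc : pvCollect (l :: ls) (some (h, b)) acc = pvCollect ls (some (h, b)) acc := by
        simp [pvCollect, hl]
      rw [List.foldl_cons, hst, hc]
      exact ih h b acc
    · by_cases hh : PySem.Str.pyGet? l 0 = some '>'
      · have hh' : PySem.List.pyGet? l.toList 0 = some '>' := by simpa using hh
        have hst : stepA (pvBuild PySem.Dict.empty (acc ++ [(h, b)]), some (pvLocus h)) l
            = ((pvBuild PySem.Dict.empty (acc ++ [(h, b)])).insert (pvLocus l) (pvEntry l []),
               some (pvLocus l)) := by
          simp only [stepA, hl, hh, if_pos, if_neg, not_false_iff]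
          simp [pvEntry, pvLocus, pv_join_nil]
        have hc : pvCollect (l :: ls) (some (h, b)) acc
            = pvCollect ls (some (l, [])) (acc ++ [(h, b)]) := by
          simp [pvCollect, hl, hh']
        have h2 := ih l [] (acc ++ [(h, b)])
        rw [pv_build_snoc] at h2
        rw [List.foldl_cons, hst, hc]
        exact h2
      · have hh' : ¬ PySem.List.pyGet? l.toList 0 = some '>' := by simpa using hh
        have hst : stepA (pvBuild PySem.Dict.empty (acc ++ [(h, b)]), some (pvLocus h)) l
            = (pvBuild PySem.Dict.empty (acc ++ [(h, b ++ [l])]), some (pvLocus h)) := by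
          simp only [stepA, hl, hh, if_neg, not_false_iff]
          rw [pv_build_snoc, pv_build_snoc, pv_insert_modify, pv_pvEntry_snoc]
        have hc : pvCollect (l :: ls) (some (h, b)) acc
            = pvCollect ls (some (h, b ++ [l])) acc := by
          simp [pvCollect, hl, hh']
        rw [List.foldl_cons, hst, hc]
        exact ih h (b ++ [l]) acc

theorem pv_noneCase (ls : List String)
    (hpre : ((ls.takeWhile (fun l => !pvIsHeader l)).all (fun l => l == "")) = true) :
    (ls.foldl stepA (PySem.Dict.empty, none)).1
      = pvBuild PySem.Dict.empty (pvCollect ls none []) := by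
  induction ls with
  | nil => simp [pvCollect, pvBuild]
  | cons l ls ih =>
    by_cases hl : l = ""
    · have hnh : (!pvIsHeader l) = true := by
        unfold pvIsHeader
        subst hl
        rfl
      rw [List.takeWhile_cons, if_pos hnh, List.all_cons, Bool.and_eq_true] at hpre
      have hst : stepA (PySem.Dict.empty, none) l = (PySem.Dict.empty, none) := by
        simp [stepA, hl]
      have hc : pvCollect (l :: ls) none [] = pvCollect ls none [] := by
        simp [pvCollect, hl]
      rw [List.foldl_cons, hst, hc]
      exact ih hpre.2
    · by_cases hh : PySem.Str.pyGet? l 0 = some '>'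
      · have hh' : PySem.List.pyGet? l.toList 0 = some '>' := by simpa using hh
        have hst : stepA (PySem.Dict.empty, none) l
            = (pvBuild PySem.Dict.empty ([] ++ [(l, [])]), some (pvLocus l)) := by
          simp only [stepA, hl, hh, if_pos, if_neg, not_false_iff]
          simp [pvBuild, pvEntry, pvLocus, pv_join_nil]
        have hc : pvCollect (l :: ls) none [] = pvCollect ls (some (l, [])) [] := by
          simp [pvCollect, hl, hh']
        rw [List.foldl_cons, hst, hc]
        exact pv_someCase ls l [] []
      · exfalso
        have hnh : (!pvIsHeader l) = true := by
          unfold pvIsHeader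
          rw [Bool.not_eq_true', Bool.and_eq_false_iff]
          right
          exact beq_eq_false_iff_ne.mpr hh
        rw [List.takeWhile_cons, if_pos hnh, List.all_cons, Bool.and_eq_true] at hpre
        exact hl (by simpa using hpre.1)

-- ===== VERDICT (by name: the statement is the Claim_ definition above) =====
theorem map_locus_to_sequence_from_fasta_spec : Claim_equal_map_locus_to_sequence_from_fasta := by
  intro fasta_lines _ hpre
  unfold Spec_map_locus_to_sequence_from_fasta
  unfold map_locus_to_sequence_from_fasta map_locus_to_sequence_from_fasta_alt
  rw [pv_noneCase fasta_lines hpre]
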